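-- pv_equiv track=rewrite | github.com/ashleyharris-maptek-com-au/CodingBenchmark | 2.py | format_graph_for_prompt
-- ===== SOURCE A (Python) =====
-- from collections import defaultdict
--
-- def format_graph_for_prompt(edges: list, num_nodes: int) -> str:
--   """Format graph as adjacency list representation for the prompt."""
--   lines = ["{"]
--   adj = defaultdict(list)
--   for a, b, w in edges:
--     adj[a].append((b, w))
--     adj[b].append((a, w))
--
--   for node in range(num_nodes):
--     neighbors = adj[node]
--     neighbor_str = ", ".join(f"({n}, {w})" for n, w in sorted(neighbors))
--     lines.append(f"    {node}: [{neighbor_str}],")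
--   lines.append("}")
--   return "\n".join(lines)
-- ===== SOURCE B (Python) =====
-- def format_graph_for_prompt(edges: list, num_nodes: int) -> str:
--   """Format graph as adjacency list representation for the prompt."""
--   entries = []
--   for a, b, w in edges:
--     entries.append((a, b, w))
--     entries.append((b, a, w))
--   # one global sort by (owner, neighbor, weight): stable sort by the
--   # secondary key pair, then by the owner
--   entries.sort(key=lambda t: (t[1], t[2]))
--   entries.sort(key=lambda t: t[0])
--   # single sweep: an advancing pointer collects each node's contiguous block
--   out = "{"
--   i = 0
--   for node in range(num_nodes):
--     while i < len(entries) and entries[i][0] < node: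
--       i += 1
--     parts = []
--     while i < len(entries) and entries[i][0] == node:
--       parts.append(f"({entries[i][1]}, {entries[i][2]})")
--       i += 1
--     out += "\n    " + str(node) + ": [" + ", ".join(parts) + "],"
--   return out + "\n}"
-- ===== Notes on version B (the rewrite author's own statement) =====
-- stated objective: alternative
-- what changed: A buckets edges into a defaultdict and sorts each node's neighbor list separately, then joins a list of lines; B builds one flat list of directed (owner, neighbor, weight) entries, sorts it once globally (stable sort by the (neighbor, weight) pair, then by owner), and emits all lines in a single sweep with an advancing pointer that collects each node's contiguous block, accumulating the output string directly.
import Mathlib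
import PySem

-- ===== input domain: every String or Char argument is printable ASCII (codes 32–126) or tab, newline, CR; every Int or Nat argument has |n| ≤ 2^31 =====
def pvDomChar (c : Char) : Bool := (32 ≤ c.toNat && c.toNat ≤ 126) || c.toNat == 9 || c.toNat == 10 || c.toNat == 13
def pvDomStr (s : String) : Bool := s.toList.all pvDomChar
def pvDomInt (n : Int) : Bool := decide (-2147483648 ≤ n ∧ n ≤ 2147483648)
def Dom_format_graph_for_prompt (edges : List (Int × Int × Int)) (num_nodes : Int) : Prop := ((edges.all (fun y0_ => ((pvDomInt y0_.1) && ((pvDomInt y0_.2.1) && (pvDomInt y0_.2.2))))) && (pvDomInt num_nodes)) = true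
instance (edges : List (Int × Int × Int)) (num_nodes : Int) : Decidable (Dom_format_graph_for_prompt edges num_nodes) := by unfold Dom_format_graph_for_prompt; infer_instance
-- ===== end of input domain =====

-- B replaces A's per-node bucket-then-sort plus line join by one global stable sort of all
-- directed entries followed by a single advancing-pointer sweep that accumulates the output
-- string directly; objective: alternative algorithm.

-- ===== PORT A =====
-- the defaultdict(list) adjacency build: two appends per edge, in edge order.
-- (A's 'adj[node]' read inserts a fresh [] for a missing key; that mutation is
-- invisible in the return value, so the read is ported as getD.)
def pvAdjA (edges : List (Int × Int × Int)) : PySem.Dict Int (List (Int × Int)) :=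
  edges.foldl
    (fun adj e =>
      (adj.modify e.1 [] (fun l => l ++ [(e.2.1, e.2.2)])).modify e.2.1 []
        (fun l => l ++ [(e.1, e.2.2)]))
    PySem.Dict.empty

-- one line of A's loop body: per-node sorted(neighbors) (Python tuple sort = sorted2)
def pvLineA (adj : PySem.Dict Int (List (Int × Int))) (node : Int) : String :=
  "    " ++ PySem.Int.toStr node ++ ": [" ++
    PySem.Str.join ", "
      ((PySem.List.sorted2 (adj.getD node []) (fun p => p.1) (fun p => p.2)).map
        (fun p => "(" ++ PySem.Int.toStr p.1 ++ ", " ++ PySem.Int.toStr p.2 ++ ")")) ++ "],"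

def format_graph_for_prompt (edges : List (Int × Int × Int)) (num_nodes : Int) : String :=
  PySem.Str.join "\n"
    (((PySem.List.pyRange 0 num_nodes 1).foldl
        (fun lines node => lines ++ [pvLineA (pvAdjA edges) node]) ["{"]) ++ ["}"])

-- ===== PORT B =====
-- flat directed entry list, sorted by (owner, neighbor, weight) as two stable sorts
-- (secondary key pair first, then owner), exactly as Source B does
def pvEntriesB (edges : List (Int × Int × Int)) : List (Int × Int × Int) :=
  PySem.List.sorted
    (PySem.List.sorted2
      (edges.foldl (fun acc e => (acc ++ [(e.1, e.2.1, e.2.2)]) ++ [(e.2.1, e.1, e.2.2)]) [])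
      (fun t => t.2.1) (fun t => t.2.2))
    (fun t => t.1)

-- the entry formatter f"({b}, {w})"
def pvFmtB (p : Int × Int) : String :=
  "(" ++ PySem.Int.toStr p.1 ++ ", " ++ PySem.Int.toStr p.2 ++ ")"

-- Source B's first inner while: advance the pointer past entries whose owner < node
-- (the pointer suffix entries[i:] is represented by the remaining list)
def pvSkipB (v : Int) : List (Int × Int × Int) → List (Int × Int × Int)
  | [] => []
  | t :: ts => if t.1 < v then pvSkipB v ts else t :: ts

-- Source B's second inner while: collect the contiguous block with owner == node
def pvTakeB (v : Int) : List (Int × Int × Int) → List String × List (Int × Int × Int)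
  | [] => ([], [])
  | t :: ts =>
      if t.1 == v then
        let r := pvTakeB v ts
        (pvFmtB t.2 :: r.1, r.2)
      else ([], t :: ts)

-- Source B's main for loop: one line appended to 'out' per node
def pvEmitB : Nat → Int → List (Int × Int × Int) → String → String
  | 0, _, _, out => out ++ "\n}"
  | n + 1, node, rest, out =>
      let rest1 := pvSkipB node rest
      let pr := pvTakeB node rest1
      pvEmitB n (node + 1) pr.2
        (out ++ ("\n    " ++ PySem.Int.toStr node ++ ": [" ++ PySem.Str.join ", " pr.1 ++ "],"))

def format_graph_for_prompt_alt (edges : List (Int × Int × Int)) (num_nodes : Int) : String :=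
  pvEmitB num_nodes.toNat 0 (pvEntriesB edges) "{"

-- ===== PRECONDITION & SPEC =====
def Spec_format_graph_for_prompt (edges : List (Int × Int × Int)) (num_nodes : Int) (out : String) : Prop := out = format_graph_for_prompt_alt edges num_nodes
instance (edges : List (Int × Int × Int)) (num_nodes : Int) (out : String) : Decidable (Spec_format_graph_for_prompt edges num_nodes out) := by unfold Spec_format_graph_for_prompt; infer_instance

-- ===== CLAIM (what is proved, stated in full; the proofs are below) =====
def Claim_equal_format_graph_for_prompt : Prop := ∀ (edges : List (Int × Int × Int)) (num_nodes : Int), Dom_format_graph_for_prompt edges num_nodes → Spec_format_graph_for_prompt edges num_nodes (format_graph_for_prompt edges num_nodes)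

-- ===== LEMMAS AND PROOFS =====

-- packing a bounded (neighbor, weight) pair into one Int, lexicographically
def pvC : Int := 8589934592   -- 2^33 > twice the Dom bound 2^31
def pvK2 (p : Int × Int) : Int := p.1 * pvC + p.2
def pvBnd (p : Int × Int) : Prop :=
  -2147483648 ≤ p.1 ∧ p.1 ≤ 2147483648 ∧ -2147483648 ≤ p.2 ∧ p.2 ≤ 2147483648

-- the flat directed entry list both programs are really working over
def pvD (edges : List (Int × Int × Int)) : List (Int × Int × Int) :=
  edges.flatMap (fun e => [(e.1, e.2.1, e.2.2), (e.2.1, e.1, e.2.2)])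

-- the line both programs print for node v, phrased over the sorted entry list
def pvLine (l : List (Int × Int × Int)) (v : Int) : String :=
  "    " ++ PySem.Int.toStr v ++ ": [" ++
    PySem.Str.join ", " ((l.filter (fun t => t.1 == v)).map (fun t => pvFmtB t.2)) ++ "],"

theorem pvBefore_eq (a b : Int × Int) (ha : pvBnd a) (hb : pvBnd b) :
    (decide (a.1 < b.1) || (!decide (b.1 < a.1) && decide (a.2 < b.2)))
      = decide (pvK2 a < pvK2 b) := by
  obtain ⟨ha1, ha2, ha3, ha4⟩ := ha
  obtain ⟨hb1, hb2, hb3, hb4⟩ := hb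
  simp only [pvK2, pvC, ← decide_not, ← Bool.decide_and, ← Bool.decide_or]
  apply decide_eq_decide.2
  omega

theorem pv_insertBy_congr {α : Type} (b1 b2 : α → α → Bool) (x : α) (l : List α)
    (h : ∀ y ∈ l, b1 x y = b2 x y) :
    PySem.List.insertBy b1 x l = PySem.List.insertBy b2 x l := by
  induction l with
  | nil => rfl
  | cons y ys ih =>
      have hy := h y (List.mem_cons_self)
      simp only [PySem.List.insertBy, hy]
      split
      · rfl
      · rw [ih (fun z hz => h z (List.mem_cons_of_mem _ hz))]

theorem pv_foldl_insertBy_congr {α : Type} (P : α → Prop) (b1 b2 : α → α → Bool)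
    (hb : ∀ x y, P x → P y → b1 x y = b2 x y) :
    ∀ (xs acc : List α), (∀ x ∈ xs, P x) → (∀ x ∈ acc, P x) →
      xs.foldl (fun acc x => PySem.List.insertBy b1 x acc) acc
        = xs.foldl (fun acc x => PySem.List.insertBy b2 x acc) acc := by
  intro xs
  induction xs with
  | nil => intro acc _ _; rfl
  | cons x xs ih =>
      intro acc hxs hacc
      simp only [List.foldl_cons]
      rw [pv_insertBy_congr b1 b2 x acc
        (fun y hy => hb x y (hxs x List.mem_cons_self) (hacc y hy))]
      exact ih _ (fun z hz => hxs z (List.mem_cons_of_mem _ hz))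
        (fun z hz => ((PySem.List.mem_insertBy b2 x z acc).1 hz).elim
          (fun h => h ▸ hxs x List.mem_cons_self) (hacc z))

theorem pv_sorted2_pairs (xs : List (Int × Int)) (h : ∀ x ∈ xs, pvBnd x) :
    PySem.List.sorted2 xs (fun p => p.1) (fun p => p.2) = PySem.List.sorted xs pvK2 := by
  show xs.foldl (fun acc x => PySem.List.insertBy
        (fun a b => decide (a.1 < b.1) || (!decide (b.1 < a.1) && decide (a.2 < b.2))) x acc) []
      = xs.foldl (fun acc x => PySem.List.insertBy (fun a b => decide (pvK2 a < pvK2 b)) x acc) []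
  exact pv_foldl_insertBy_congr pvBnd _ _ (fun a b ha hb => pvBefore_eq a b ha hb) xs []
    h (by simp)

theorem pv_sorted2_triples (xs : List (Int × Int × Int)) (h : ∀ x ∈ xs, pvBnd x.2) :
    PySem.List.sorted2 xs (fun t => t.2.1) (fun t => t.2.2)
      = PySem.List.sorted xs (fun t => pvK2 t.2) := by
  show xs.foldl (fun acc x => PySem.List.insertBy
        (fun a b => decide (a.2.1 < b.2.1) || (!decide (b.2.1 < a.2.1) && decide (a.2.2 < b.2.2))) x acc) []
      = xs.foldl (fun acc x => PySem.List.insertBy (fun a b => decide (pvK2 a.2 < pvK2 b.2)) x acc) []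
  exact pv_foldl_insertBy_congr (fun t => pvBnd t.2) _ _
    (fun a b ha hb => pvBefore_eq a.2 b.2 ha hb) xs [] h (by simp)

theorem pv_insertBy_all_before {α : Type} (b : α → α → Bool) (x : α) (l : List α)
    (h : ∀ z ∈ l, b x z = true) : PySem.List.insertBy b x l = x :: l := by
  cases l with
  | nil => rfl
  | cons y ys => simp [PySem.List.insertBy, h y List.mem_cons_self]

theorem pv_pairwise_insertBy {α : Type} (key : α → Int) (x : α) (l : List α)
    (h : l.Pairwise (fun a b => key a ≤ key b)) :
    (PySem.List.insertBy (fun a b => decide (key a < key b)) x l).Pairwise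
      (fun a b => key a ≤ key b) := by
  induction l with
  | nil => simp [PySem.List.insertBy]
  | cons y ys ih =>
      rcases List.pairwise_cons.1 h with ⟨hy, hys⟩
      by_cases hxy : key x < key y
      · rw [show PySem.List.insertBy (fun a b => decide (key a < key b)) x (y :: ys)
            = x :: y :: ys from by simp [PySem.List.insertBy, hxy]]
        exact List.pairwise_cons.2 ⟨fun z hz => by
          rcases List.mem_cons.1 hz with h' | h'
          · exact h' ▸ le_of_lt hxy
          · exact le_trans (le_of_lt hxy) (hy z h'), h⟩
      · rw [show PySem.List.insertBy (fun a b => decide (key a < key b)) x (y :: ys)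
            = y :: PySem.List.insertBy (fun a b => decide (key a < key b)) x ys from by
              simp [PySem.List.insertBy, hxy]]
        refine List.pairwise_cons.2 ⟨fun z hz => ?_, ih hys⟩
        rcases (PySem.List.mem_insertBy _ x z ys).1 hz with h' | h'
        · exact h' ▸ le_of_not_gt hxy
        · exact hy z h'

theorem pv_filter_insertBy {α : Type} (key : α → Int) (q : α → Bool) (x : α) (l : List α)
    (h : l.Pairwise (fun a b => key a ≤ key b)) :
    (PySem.List.insertBy (fun a b => decide (key a < key b)) x l).filter q
      = if q x then PySem.List.insertBy (fun a b => decide (key a < key b)) x (l.filter q)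
        else l.filter q := by
  induction l with
  | nil => cases hq : q x <;> simp [PySem.List.insertBy, List.filter, hq]
  | cons y ys ih =>
      rcases List.pairwise_cons.1 h with ⟨hy, hys⟩
      by_cases hxy : key x < key y
      · rw [show PySem.List.insertBy (fun a b => decide (key a < key b)) x (y :: ys)
            = x :: y :: ys from by simp [PySem.List.insertBy, hxy]]
        cases hq : q x
        · simp [List.filter_cons, hq]
        · have hall : ∀ z ∈ (y :: ys).filter q, decide (key x < key z) = true := by
            intro z hz
            have hz' := (List.mem_filter.1 hz).1
            rcases List.mem_cons.1 hz' with h' | h'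
            · subst h'; simpa using hxy
            · simpa using lt_of_lt_of_le hxy (hy z h')
          rw [pv_insertBy_all_before _ x _ hall]
          simp [List.filter_cons, hq]
      · rw [show PySem.List.insertBy (fun a b => decide (key a < key b)) x (y :: ys)
            = y :: PySem.List.insertBy (fun a b => decide (key a < key b)) x ys from by
              simp [PySem.List.insertBy, hxy]]
        by_cases hqy : q y = true
        · rw [List.filter_cons_of_pos hqy, List.filter_cons_of_pos hqy, ih hys]
          cases hq : q x
          · simp
          · rw [show PySem.List.insertBy (fun a b => decide (key a < key b)) x (y :: ys.filter q)
                = y :: PySem.List.insertBy (fun a b => decide (key a < key b)) x (ys.filter q) from by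
                  simp [PySem.List.insertBy, hxy]]
            simp
        · rw [List.filter_cons_of_neg (by simpa using hqy),
              List.filter_cons_of_neg (by simpa using hqy)]
          exact ih hys

theorem pv_sorted_filter_aux {α : Type} (key : α → Int) (q : α → Bool) :
    ∀ (xs acc : List α), acc.Pairwise (fun a b => key a ≤ key b) →
      (xs.foldl (fun acc x => PySem.List.insertBy (fun a b => decide (key a < key b)) x acc) acc).filter q
        = (xs.filter q).foldl
            (fun acc x => PySem.List.insertBy (fun a b => decide (key a < key b)) x acc)
            (acc.filter q) := by
  intro xs
  induction xs with
  | nil => intro acc _; rfl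
  | cons x xs ih =>
      intro acc h
      simp only [List.foldl_cons, List.filter_cons]
      rw [ih _ (pv_pairwise_insertBy key x acc h), pv_filter_insertBy key q x acc h]
      cases hq : q x <;> simp

theorem pv_sorted_filter_comm {α : Type} (key : α → Int) (q : α → Bool) (xs : List α) :
    (PySem.List.sorted xs key).filter q = PySem.List.sorted (xs.filter q) key :=
  pv_sorted_filter_aux key q xs [] List.Pairwise.nil

theorem pv_map_insertBy {α β : Type} (f : α → β) (b : β → β → Bool) (x : α) (l : List α) :
    (PySem.List.insertBy (fun u v => b (f u) (f v)) x l).map f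
      = PySem.List.insertBy b (f x) (l.map f) := by
  induction l with
  | nil => rfl
  | cons y ys ih =>
      cases hb : b (f x) (f y) <;> simp [PySem.List.insertBy, hb, ih]

theorem pv_map_sorted_aux {α β : Type} (f : α → β) (key : β → Int) :
    ∀ (xs : List α) (acc : List α),
      (xs.foldl (fun acc x => PySem.List.insertBy
          (fun u v => decide (key (f u) < key (f v))) x acc) acc).map f
        = (xs.map f).foldl
            (fun acc x => PySem.List.insertBy (fun u v => decide (key u < key v)) x acc)
            (acc.map f) := by
  intro xs
  induction xs with
  | nil => intro acc; rfl
  | cons x xs ih =>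
      intro acc
      simp only [List.foldl_cons, List.map_cons]
      rw [ih]
      rw [pv_map_insertBy f (fun u v => decide (key u < key v)) x acc]

theorem pv_map_sorted {α β : Type} (f : α → β) (key : β → Int) (xs : List α) :
    (PySem.List.sorted xs (fun x => key (f x))).map f
      = PySem.List.sorted (xs.map f) key :=
  pv_map_sorted_aux f key xs []

theorem pv_adjA_getD (edges : List (Int × Int × Int)) (v : Int) :
    (pvAdjA edges).getD v []
      = ((pvD edges).filter (fun t => t.1 == v)).map (fun t => t.2) := by
  have h1 : pvAdjA edges
      = (pvD edges).foldl (fun d t => d.modify t.1 [] (fun l => l ++ [t.2]))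
          PySem.Dict.empty := by
    unfold pvAdjA pvD
    rw [List.foldl_flatMap]
    rfl
  rw [h1, PySem.Dict.getD_foldl_modify_append]
  rfl

theorem pv_entries_raw (edges : List (Int × Int × Int)) :
    edges.foldl (fun acc e => (acc ++ [(e.1, e.2.1, e.2.2)]) ++ [(e.2.1, e.1, e.2.2)]) []
      = pvD edges := by
  suffices h : ∀ acc, edges.foldl
      (fun acc e => (acc ++ [(e.1, e.2.1, e.2.2)]) ++ [(e.2.1, e.1, e.2.2)]) acc
      = acc ++ pvD edges by simpa using h []
  induction edges with
  | nil => intro acc; simp [pvD]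
  | cons e es ih =>
      intro acc
      simp only [List.foldl_cons]
      rw [ih]
      simp [pvD, List.flatMap_cons, List.append_assoc]

theorem pv_dom_bnd (edges : List (Int × Int × Int)) (num_nodes : Int)
    (hd : Dom_format_graph_for_prompt edges num_nodes) :
    ∀ t ∈ pvD edges, pvBnd t.2 := by
  intro t ht
  unfold pvD at ht
  rw [List.mem_flatMap] at ht
  obtain ⟨e, he, ht⟩ := ht
  unfold Dom_format_graph_for_prompt at hd
  simp only [Bool.and_eq_true, List.all_eq_true, pvDomInt, decide_eq_true_eq] at hd
  have hb := hd.1 e he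
  simp only [List.mem_cons, List.not_mem_nil, or_false] at ht
  rcases ht with h' | h' <;> subst h' <;> simp [pvBnd] <;> omega

-- A's per-node sorted bucket = the node's slice of B's globally sorted entry list
theorem pv_node (edges : List (Int × Int × Int)) (v : Int)
    (hb : ∀ t ∈ pvD edges, pvBnd t.2) :
    PySem.List.sorted2 ((pvAdjA edges).getD v []) (fun p => p.1) (fun p => p.2)
      = ((pvEntriesB edges).filter (fun t => t.1 == v)).map (fun t => t.2) := by
  rw [pv_adjA_getD]
  rw [pv_sorted2_pairs _ (by
    intro p hp
    rw [List.mem_map] at hp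
    obtain ⟨t, ht, hp⟩ := hp
    exact hp ▸ hb t (List.mem_filter.1 ht).1)]
  unfold pvEntriesB
  rw [pv_entries_raw, pv_sorted2_triples _ hb]
  rw [pv_sorted_filter_comm (fun t : Int × Int × Int => t.1) (fun t => t.1 == v)
        (PySem.List.sorted (pvD edges) (fun t => pvK2 t.2))]
  rw [PySem.List.sorted_eq_self_of_pairwise
        ((PySem.List.sorted (pvD edges) (fun t => pvK2 t.2)).filter (fun t => t.1 == v))
        (fun t => t.1) (List.pairwise_of_forall_mem_list (by
    intro a ha b hbb
    have h1 : a.1 = v := by simpa using (List.mem_filter.1 ha).2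
    have h2 : b.1 = v := by simpa using (List.mem_filter.1 hbb).2
    dsimp only
    omega))]
  rw [pv_sorted_filter_comm (fun t : Int × Int × Int => pvK2 t.2) (fun t => t.1 == v)
        (pvD edges)]
  rw [show (fun t : Int × Int × Int => pvK2 t.2) = (fun t : Int × Int × Int => pvK2 ((fun s : Int × Int × Int => s.2) t)) from rfl]
  rw [pv_map_sorted (fun t : Int × Int × Int => t.2) pvK2
        ((pvD edges).filter (fun t => t.1 == v))]

-- ---- String glue: "\n".join of a line list = left-fold string accumulation ----

theorem pv_join_cons_cons (s a b : String) (t : List String) :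
    PySem.Str.join s (a :: b :: t) = a ++ (s ++ PySem.Str.join s (b :: t)) := by
  simp [PySem.Str.join, PySem.Chars.join, List.intercalate]

theorem pv_append_foldl (t : List String) :
    ∀ (p acc : String),
      p ++ t.foldl (fun a x => a ++ ("\n" ++ x)) acc
        = t.foldl (fun a x => a ++ ("\n" ++ x)) (p ++ acc) := by
  induction t with
  | nil => intro p acc; rfl
  | cons x xs ih =>
      intro p acc
      simp only [List.foldl_cons]
      rw [ih, String.append_assoc]

theorem pv_join_foldl :
    ∀ (L : List String) (h : String),
      PySem.Str.join "\n" (h :: L) = L.foldl (fun acc x => acc ++ ("\n" ++ x)) h := by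
  intro L
  induction L with
  | nil =>
      intro h
      simp [PySem.Str.join, PySem.Chars.join, List.intercalate]
  | cons x t ih =>
      intro h
      rw [pv_join_cons_cons, ih, pv_append_foldl, pv_append_foldl, List.foldl_cons]

-- ---- B's sweep: skip + take on an owner-sorted list are filters ----

theorem pv_take_spec (v : Int) :
    ∀ (l : List (Int × Int × Int)), (∀ y ∈ l, v ≤ y.1) →
      l.Pairwise (fun a b => a.1 ≤ b.1) →
      pvTakeB v l = (((l.filter (fun t => t.1 == v)).map (fun t => pvFmtB t.2)),
        l.filter (fun t => decide (v < t.1))) := by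
  intro l
  induction l with
  | nil => intro _ _; rfl
  | cons t ts ih =>
      intro hge hp
      rcases List.pairwise_cons.1 hp with ⟨ht, hts⟩
      by_cases h1 : t.1 = v
      · have hbeq : (t.1 == v) = true := by simpa using h1
        simp only [pvTakeB, hbeq]
        rw [ih (fun y hy => hge y (List.mem_cons_of_mem _ hy)) hts]
        have hnlt : decide (v < t.1) = false := by simp [h1]
        simp [hbeq, hnlt]
      · have hlt : v < t.1 := lt_of_le_of_ne (hge t List.mem_cons_self) (Ne.symm h1)
        have hbeq : (t.1 == v) = false := by simpa using h1
        simp only [pvTakeB, hbeq]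
        rw [if_neg (by simp)]
        have hfil1 : (t :: ts).filter (fun t => t.1 == v) = [] := by
          rw [List.filter_eq_nil_iff]
          intro y hy
          rcases List.mem_cons.1 hy with h' | h'
          · subst h'; simp [h1]
          · have : t.1 ≤ y.1 := ht y h'
            simp only [beq_iff_eq]; omega
        have hfil2 : (t :: ts).filter (fun t => decide (v < t.1)) = t :: ts := by
          rw [List.filter_eq_self]
          intro y hy
          rcases List.mem_cons.1 hy with h' | h'
          · subst h'; simpa using hlt
          · have : t.1 ≤ y.1 := ht y h'
            simp only [decide_eq_true_eq]; omega
        rw [hfil1, hfil2]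
        rfl

theorem pv_skip_eq_filter (v : Int) :
    ∀ (l : List (Int × Int × Int)), l.Pairwise (fun a b => a.1 ≤ b.1) →
      pvSkipB v l = l.filter (fun t => !decide (t.1 < v)) := by
  intro l
  induction l with
  | nil => intro _; rfl
  | cons t ts ih =>
      intro hp
      rcases List.pairwise_cons.1 hp with ⟨ht, hts⟩
      by_cases h1 : t.1 < v
      · simp only [pvSkipB, if_pos h1]
        rw [ih hts]
        simp [h1]
      · simp only [pvSkipB, if_neg h1]
        have : ts.filter (fun t => !decide (t.1 < v)) = ts := by
          rw [List.filter_eq_self]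
          intro y hy
          have := ht y hy
          simp only [Bool.not_eq_eq_eq_not, Bool.not_true, decide_eq_false_iff_not]
          omega
        simp [h1, this]

theorem pv_skip_take (v : Int) (l : List (Int × Int × Int))
    (hp : l.Pairwise (fun a b => a.1 ≤ b.1)) :
    pvTakeB v (pvSkipB v l)
      = (((l.filter (fun t => t.1 == v)).map (fun t => pvFmtB t.2)),
         l.filter (fun t => decide (v < t.1))) := by
  rw [pv_skip_eq_filter v l hp]
  rw [pv_take_spec v _ (by
    intro y hy
    have := (List.mem_filter.1 hy).2
    simp only [Bool.not_eq_eq_eq_not, Bool.not_true, decide_eq_false_iff_not] at this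
    omega) (hp.filter _)]
  have h1 : (l.filter (fun t => !decide (t.1 < v))).filter (fun t => t.1 == v)
      = l.filter (fun t => t.1 == v) := by
    rw [List.filter_filter]
    apply List.filter_congr
    intro t _
    by_cases h : t.1 = v
    · simp [h]
    · simp [h]
  have h2 : (l.filter (fun t => !decide (t.1 < v))).filter (fun t => decide (v < t.1))
      = l.filter (fun t => decide (v < t.1)) := by
    rw [List.filter_filter]
    apply List.filter_congr
    intro t _
    by_cases h : v < t.1
    · have hn : ¬ t.1 < v := by omega
      simp [h, hn]
    · simp [h]
  rw [h1, h2]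

theorem pv_line_filter_gt (l : List (Int × Int × Int)) (node v : Int) (hv : node < v) :
    pvLine (l.filter (fun t => decide (node < t.1))) v = pvLine l v := by
  unfold pvLine
  have h1 : (l.filter (fun t => decide (node < t.1))).filter (fun t => t.1 == v)
      = l.filter (fun t => t.1 == v) := by
    rw [List.filter_filter]
    apply List.filter_congr
    intro t _
    by_cases h : t.1 = v
    · simp [h, hv]
    · simp [h]
  rw [h1]

theorem pv_foldl_line_congr {α : Type} (f g : α → String) :
    ∀ (L : List α) (acc : String), (∀ v ∈ L, f v = g v) →
      L.foldl (fun a v => a ++ ("\n" ++ f v)) acc = L.foldl (fun a v => a ++ ("\n" ++ g v)) acc := by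
  intro L
  induction L with
  | nil => intro acc _; rfl
  | cons v vs ih =>
      intro acc h
      simp only [List.foldl_cons]
      rw [h v List.mem_cons_self, ih _ (fun y hy => h y (List.mem_cons_of_mem _ hy))]

-- the sweep, characterised: each node's block is a filter of the full sorted list
theorem pv_emit_eq :
    ∀ (n : Nat) (node : Int) (l : List (Int × Int × Int)) (acc : String),
      l.Pairwise (fun a b => a.1 ≤ b.1) →
      pvEmitB n node l acc
        = (PySem.List.pyRange node (node + (n : Int)) 1).foldl
            (fun a v => a ++ ("\n" ++ pvLine l v)) acc ++ "\n}" := by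
  intro n
  induction n with
  | zero =>
      intro node l acc _
      simp [pvEmitB, PySem.List.pyRange_one_eq_nil]
  | succ n ih =>
      intro node l acc hp
      simp only [pvEmitB]
      rw [pv_skip_take node l hp]
      rw [ih (node + 1) (l.filter (fun t => decide (node < t.1))) _ ((hp.filter _))]
      have hline : acc ++ ("\n    " ++ PySem.Int.toStr node ++ ": [" ++
            PySem.Str.join ", " ((l.filter (fun t => t.1 == node)).map (fun t => pvFmtB t.2)) ++ "],")
          = acc ++ ("\n" ++ pvLine l node) := by
        unfold pvLine
        rw [show ("\n    " : String) = "\n" ++ "    " from by decide]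
        simp only [String.append_assoc]
      rw [hline]
      have hcongr : (PySem.List.pyRange (node + 1) (node + 1 + (n : Int)) 1).foldl
            (fun a v => a ++ ("\n" ++ pvLine (l.filter (fun t => decide (node < t.1))) v))
            (acc ++ ("\n" ++ pvLine l node))
          = (PySem.List.pyRange (node + 1) (node + 1 + (n : Int)) 1).foldl
            (fun a v => a ++ ("\n" ++ pvLine l v)) (acc ++ ("\n" ++ pvLine l node)) := by
        apply pv_foldl_line_congr
        intro v hv
        rw [PySem.List.mem_pyRange_one] at hv
        apply pv_line_filter_gt
        omega
      rw [hcongr]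
      rw [show node + (((n + 1 : ℕ)) : Int) = node + 1 + (n : Int) from by push_cast; ring]
      rw [show PySem.List.pyRange node (node + 1 + (n : Int)) 1
            = node :: PySem.List.pyRange (node + 1) (node + 1 + (n : Int)) 1 from
          PySem.List.pyRange_one_cons (by omega)]
      rw [List.foldl_cons]

-- A's line for node v equals the sweep's line over the sorted entry list
theorem pv_lineA_eq (edges : List (Int × Int × Int)) (v : Int)
    (hb : ∀ t ∈ pvD edges, pvBnd t.2) :
    pvLineA (pvAdjA edges) v = pvLine (pvEntriesB edges) v := by
  unfold pvLineA pvLine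
  rw [pv_node edges v hb, List.map_map]
  rfl

-- ===== VERDICT (by name: the statement is the Claim_ definition above) =====
theorem format_graph_for_prompt_spec : Claim_equal_format_graph_for_prompt := by
  intro edges num_nodes hd
  unfold Spec_format_graph_for_prompt format_graph_for_prompt format_graph_for_prompt_alt
  rw [PySem.List.foldl_append_singleton_eq_map]
  have hpair : (pvEntriesB edges).Pairwise (fun a b => a.1 ≤ b.1) :=
    PySem.List.sorted_pairwise _ _
  rw [pv_emit_eq num_nodes.toNat 0 (pvEntriesB edges) "{" hpair]
  rw [show (["{"] ++ (PySem.List.pyRange 0 num_nodes 1).map (fun node => pvLineA (pvAdjA edges) node)) ++ ["}"]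
      = "{" :: ((PySem.List.pyRange 0 num_nodes 1).map (fun node => pvLineA (pvAdjA edges) node) ++ ["}"]) from by simp]
  rw [pv_join_foldl]
  rw [List.foldl_append]
  simp only [List.foldl_cons, List.foldl_nil]
  rw [show ("\n" ++ "}" : String) = "\n}" from by decide]
  congr 1
  have hrange : PySem.List.pyRange 0 (0 + (num_nodes.toNat : Int)) 1
      = PySem.List.pyRange 0 num_nodes 1 := by
    by_cases hn : 0 ≤ num_nodes
    · rw [zero_add, Int.toNat_of_nonneg hn]
    · rw [PySem.List.pyRange_one_eq_nil (by omega), PySem.List.pyRange_one_eq_nil (by omega)]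
  rw [hrange, List.foldl_map]
  exact pv_foldl_line_congr _ _ _ "{"
    (fun v _ => pv_lineA_eq edges v (pv_dom_bnd edges num_nodes hd))
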